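-- pv_equiv track=rewrite | github.com/marcketa/counting_rationals | CountingRationalsWithStern-BrocotAndCalkin-WilfTrees.py | bin_levels
-- ===== SOURCE A (Python) =====
-- from typing import Any, List, Union, Optional, Tuple, Callable
--
-- def bin_levels(lst: List[Any]) -> List[List[Any]]:
--     """ divide a list in blocks (lists) corresponding to the first levels of a binary tree
--
--     Args:
--         lst:  a list
--     Returns:
--         a list of levels: [lvls[0],...,lvls[k],..., lvls[-1]]]
--         length(lvls[0]) == 1, lvls[0][0] is the root of the binary tree
--         for each level k > 0, len(lvls[k]) == 2*len(lvls[k-1]),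
--         but for the last level, len(lvls[-1]) <= 2*len(lvls[-2]) depending on len(lst)
--     Example:
--         if lst = [1, 2, 3, 4, 5, 6, 7, 8, 9, 10, 11, 12, 13, 14, 15]
--         bin_levels(lst) -> [[1], [2, 3], [4, 5, 6, 7], [8, 9, 10, 11, 12, 13, 14, 15]]
--     """
--     n = len(lst)
--     lvls = []
--     m = 1
--     while 2*m <= n:
--         lvls.append(lst[m-1:2*m-1])
--         m = 2*m
--     lvls.append(lst[m-1:n+1])
--     return lvls
-- ===== SOURCE B (Python) =====
-- def bin_levels(lst):
--     """Single pass: place each element into the bucket given by its tree depth,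
--     instead of cutting doubling slices per level."""
--     lvls = [[]]
--     for i, x in enumerate(lst):
--         level = (i + 1).bit_length() - 1
--         if level == len(lvls):
--             lvls.append([])
--         lvls[level].append(x)
--     return lvls
-- ===== Notes on version B (the rewrite author's own statement) =====
-- stated objective: alternative
-- what changed: Replaces the doubling while-loop that cuts contiguous slices per level with a single enumerate pass that drops each element into the bucket indexed by its tree depth (i+1).bit_length()-1, seeding the result with one empty root bucket so the empty-input case needs no special handling.
import Mathlib
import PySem

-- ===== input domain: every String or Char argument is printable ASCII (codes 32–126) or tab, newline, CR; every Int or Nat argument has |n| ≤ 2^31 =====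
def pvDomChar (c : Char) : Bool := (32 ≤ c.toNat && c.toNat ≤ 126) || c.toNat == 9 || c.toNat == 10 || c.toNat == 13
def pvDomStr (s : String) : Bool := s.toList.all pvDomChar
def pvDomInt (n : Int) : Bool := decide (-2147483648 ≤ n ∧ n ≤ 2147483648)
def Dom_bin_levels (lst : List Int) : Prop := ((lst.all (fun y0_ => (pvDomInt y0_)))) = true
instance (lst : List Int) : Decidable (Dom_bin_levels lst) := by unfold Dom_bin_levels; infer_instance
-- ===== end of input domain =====

-- B replaces A's doubling while-loop over slices by a single enumerate pass that
-- drops each element into the bucket given by its tree depth; same cost, different decomposition.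


-- ===== PORT A =====
-- while 2*m <= n: lvls.append(lst[m-1:2*m-1]); m = 2*m ; then lvls.append(lst[m-1:n+1]).
-- The 0 < m argument only carries the invariant needed for termination (m starts at 1 and doubles).
def binLoopA (lst : List Int) (m : Nat) (hm : 0 < m) (lvls : List (List Int)) :
    List (List Int) :=
  if h : 2 * m ≤ lst.length then
    binLoopA lst (2 * m) (by omega)
      (lvls ++ [PySem.List.slice lst (some ((m : Int) - 1)) (some (2 * (m : Int) - 1))])
  else
    lvls ++ [PySem.List.slice lst (some ((m : Int) - 1)) (some ((lst.length : Int) + 1))]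
termination_by lst.length - m
decreasing_by omega

def bin_levels (lst : List Int) : List (List Int) :=
  binLoopA lst 1 (by omega) []

-- ===== PORT B =====
-- for i, x in enumerate(lst): level = (i+1).bit_length() - 1; if level == len(lvls):
-- lvls.append([]); lvls[level].append(x)   — in-place updates become a foldl over the levels list.
def bin_levels_alt (lst : List Int) : List (List Int) :=
  (PySem.List.enumerate lst).foldl
    (fun lvls p =>
      let level := PySem.Int.bitLength (p.1 + 1) - 1
      let lvls' := if level = lvls.length then lvls ++ [([] : List Int)] else lvls
      lvls'.modify level (fun b => b ++ [p.2]))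
    [[]]

-- ===== PRECONDITION & SPEC =====
def Spec_bin_levels (lst : List Int) (out : List (List Int)) : Prop := out = bin_levels_alt lst
instance (lst : List Int) (out : List (List Int)) : Decidable (Spec_bin_levels lst out) := by unfold Spec_bin_levels; infer_instance

-- ===== CLAIM (what is proved, stated in full; the proofs are below) =====
def Claim_equal_bin_levels : Prop := ∀ (lst : List Int), Dom_bin_levels lst → Spec_bin_levels lst (bin_levels lst)

-- ===== LEMMAS AND PROOFS =====

-- reference function: the binary-tree levels of l with first block size m (intended for 0 < m;
-- the 0 < m conjunct in the guard only serves termination)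
def gref (m : Nat) (l : List Int) : List (List Int) :=
  if h : m + 1 ≤ l.length ∧ 0 < m then
    l.take m :: gref (2 * m) (l.drop m)
  else [l]
termination_by l.length
decreasing_by simp; omega

-- append x to the last bucket
def snocLast (ls : List (List Int)) (x : Int) : List (List Int) :=
  match ls with
  | [] => []
  | [b] => [b ++ [x]]
  | b :: bs => b :: snocLast bs x

theorem gref_ne_nil (m : Nat) (l : List Int) : gref m l ≠ [] := by
  unfold gref; split <;> simp

theorem snocLast_cons (b : List Int) (bs : List (List Int)) (x : Int) (h : bs ≠ []) :
    snocLast (b :: bs) x = b :: snocLast bs x := by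
  cases bs with
  | nil => exact absurd rfl h
  | cons c cs => rfl

theorem length_snocLast (ls : List (List Int)) (x : Int) :
    (snocLast ls x).length = ls.length := by
  induction ls with
  | nil => rfl
  | cons b bs ih =>
    cases bs with
    | nil => rfl
    | cons c cs => rw [snocLast_cons _ _ _ (by simp)]; simp_all

def isPow2 (n : Nat) : Prop := ∃ k, n = 2 ^ k

theorem not_isPow2_between {j n : Nat} (h1 : 2 ^ j < n) (h2 : n < 2 ^ (j + 1)) :
    ¬ isPow2 n := by
  rintro ⟨k, rfl⟩
  rcases Nat.lt_or_ge k (j + 1) with hk | hk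
  · exact absurd (Nat.pow_le_pow_right (by omega) (by omega) : 2 ^ k ≤ 2 ^ j) (by omega)
  · exact absurd (Nat.pow_le_pow_right (by omega) hk : 2 ^ (j + 1) ≤ 2 ^ k) (by omega)

-- gref-snoc: appending one element opens a new bucket exactly when the new total
-- length l.length + 2^j is a power of two and l is nonempty; otherwise it extends the last bucket
theorem gref_snoc : ∀ (N j : Nat) (l : List Int) (x : Int), l.length ≤ N →
    ((0 < l.length ∧ isPow2 (l.length + 2 ^ j)) →
        gref (2 ^ j) (l ++ [x]) = gref (2 ^ j) l ++ [[x]]) ∧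
    (¬ (0 < l.length ∧ isPow2 (l.length + 2 ^ j)) →
        gref (2 ^ j) (l ++ [x]) = snocLast (gref (2 ^ j) l) x) := by
  intro N
  induction N with
  | zero =>
    intro j l x hN
    have hl : l = [] := List.length_eq_zero_iff.mp (by omega)
    subst hl
    refine ⟨fun h => by simp at h, fun _ => ?_⟩
    have hm : (0:Nat) < 2 ^ j := Nat.two_pow_pos j
    unfold gref
    rw [dif_neg (by simp), dif_neg (by simp)]
    rfl
  | succ N ih =>
    intro j l x hN
    have hm : (0:Nat) < 2 ^ j := Nat.two_pow_pos j
    set m := 2 ^ j with hmj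
    rcases Nat.lt_trichotomy l.length m with hlt | heq | hgt
    · -- l.length < m : one bucket, x joins it
      have hcond : ¬ (0 < l.length ∧ isPow2 (l.length + m)) := by
        rintro ⟨hpos, hp⟩
        exact not_isPow2_between (j := j) (by omega) (by rw [pow_succ]; omega) hp
      refine ⟨fun h => absurd h hcond, fun _ => ?_⟩
      unfold gref
      rw [dif_neg (by simp; omega), dif_neg (by simp; omega)]
      rfl
    · -- l.length = m : new bucket [x]
      have hcond : 0 < l.length ∧ isPow2 (l.length + m) :=
        ⟨by omega, ⟨j + 1, by rw [pow_succ]; omega⟩⟩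
      refine ⟨fun _ => ?_, fun h => absurd hcond h⟩
      conv_lhs => unfold gref
      rw [dif_pos (by simp; omega)]
      have ht : (l ++ [x]).take m = l := by
        rw [List.take_append_of_le_length (by omega), List.take_of_length_le (by omega)]
      have hd : (l ++ [x]).drop m = [x] := by
        rw [List.drop_append_of_le_length (by omega), List.drop_of_length_le (by omega)]
        simp
      rw [ht, hd]
      conv_rhs => unfold gref
      rw [dif_neg (by simp; omega)]
      unfold gref
      rw [dif_neg (by simp)]
      rfl
    · -- l.length > m : recurse
      have hstep : gref m (l ++ [x]) = l.take m :: gref (2 * m) (l.drop m ++ [x]) := by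
        conv_lhs => unfold gref
        rw [dif_pos (by simp; omega), List.take_append_of_le_length (by omega),
          List.drop_append_of_le_length (by omega)]
      have hstep' : gref m l = l.take m :: gref (2 * m) (l.drop m) := by
        conv_lhs => unfold gref
        rw [dif_pos (by simp; omega)]
      have h2m : (2 : Nat) * m = 2 ^ (j + 1) := by rw [hmj, pow_succ]; omega
      have hlen : (l.drop m).length = l.length - m := by simp
      have ihj := ih (j + 1) (l.drop m) x (by simp; omega)
      rw [← h2m, hlen] at ihj
      have hcnd : (0 < l.length - m ∧ isPow2 (l.length - m + 2 * m))
          ↔ (0 < l.length ∧ isPow2 (l.length + m)) := by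
        constructor
        · rintro ⟨h1, k, hk⟩
          exact ⟨by omega, ⟨k, by omega⟩⟩
        · rintro ⟨h1, k, hk⟩
          exact ⟨by omega, ⟨k, by omega⟩⟩
      constructor
      · intro hc
        rw [hstep, hstep', ihj.1 (hcnd.mpr hc)]
        simp
      · intro hc
        rw [hstep, hstep', ihj.2 (fun h => hc (hcnd.mp h)),
          snocLast_cons _ _ _ (gref_ne_nil _ _)]

-- lg m := bit_length(m) - 1
def lg (m : Nat) : Nat := PySem.Int.bitLength (m : Int) - 1

theorem lg_bracket {m : Nat} (hm : 0 < m) : 2 ^ lg m ≤ m ∧ m < 2 ^ (lg m + 1) := by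
  have h1 := PySem.Int.lt_two_pow_bitLength (m : Int)
  have h2 : 2 ^ (PySem.Int.bitLength (m : Int) - 1) ≤ ((m : Int)).natAbs := by
    apply PySem.Int.two_pow_bitLength_le
    simp; omega
  simp only [Int.natAbs_natCast] at h1 h2
  have hb : 1 ≤ PySem.Int.bitLength (m : Int) := by
    by_contra h
    have h0 : PySem.Int.bitLength (m : Int) = 0 := by omega
    rw [h0] at h1; simp at h1; omega
  refine ⟨h2, ?_⟩
  unfold lg
  rw [Nat.sub_add_cancel hb]
  exact h1

theorem lg_unique {m e : Nat} (h1 : 2 ^ e ≤ m) (h2 : m < 2 ^ (e + 1)) : lg m = e := by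
  have hm : 0 < m := lt_of_lt_of_le (Nat.two_pow_pos e) h1
  obtain ⟨b1, b2⟩ := lg_bracket hm
  rcases Nat.lt_trichotomy (lg m) e with h | h | h
  · have : (2:Nat) ^ (lg m + 1) ≤ 2 ^ e := Nat.pow_le_pow_right (by omega) (by omega)
    omega
  · exact h
  · have : (2:Nat) ^ (e + 1) ≤ 2 ^ lg m := Nat.pow_le_pow_right (by omega) (by omega)
    omega

theorem lg_pow (k : Nat) : lg (2 ^ k) = k :=
  lg_unique (le_refl _) (Nat.pow_lt_pow_right (by omega) (by omega))

theorem lg_succ_pow {n : Nat} (hn : 0 < n) (hp : isPow2 (n + 1)) : lg (n + 1) = lg n + 1 := by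
  obtain ⟨k, hk⟩ := hp
  have hk1 : 1 ≤ k := by
    by_contra h
    have h0 : k = 0 := by omega
    rw [h0] at hk; simp at hk; omega
  have hsplit : (2:Nat) ^ (k - 1) * 2 = 2 ^ k := by
    rw [← pow_succ]; congr 1; omega
  have hln : lg n = k - 1 := by
    apply lg_unique
    · omega
    · have hkk : k - 1 + 1 = k := by omega
      rw [hkk]; omega
  rw [hk, lg_pow, hln]; omega

theorem lg_succ_not_pow {n : Nat} (hn : 0 < n) (hp : ¬ isPow2 (n + 1)) : lg (n + 1) = lg n := by
  obtain ⟨b1, b2⟩ := lg_bracket hn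
  apply lg_unique
  · omega
  · rcases Nat.lt_or_ge (n + 1) (2 ^ (lg n + 1)) with h | h
    · exact h
    · exact absurd ⟨lg n + 1, by omega⟩ hp

theorem lg_one : lg 1 = 0 := lg_unique (by norm_num) (by norm_num)

-- length of the top-level gref result
theorem length_gref (l : List Int) (hl : l ≠ []) :
    (gref 1 l).length = lg l.length + 1 := by
  induction l using List.reverseRecOn with
  | nil => exact absurd rfl hl
  | append_singleton l x ih =>
    have hs := gref_snoc l.length 0 l x (le_refl _)
    rw [pow_zero] at hs
    by_cases hnil : l = []
    · subst hnil
      rw [hs.2 (by simp)]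
      unfold gref; rw [dif_neg (by simp)]
      simp [snocLast, lg_one]
    · have hn : 0 < l.length := List.length_pos_iff.mpr hnil
      by_cases hc : 0 < l.length ∧ isPow2 (l.length + 1)
      · rw [hs.1 hc]
        simp only [List.length_append, List.length_cons, List.length_nil]
        rw [lg_succ_pow hn hc.2, ih hnil]
      · rw [hs.2 hc, length_snocLast, ih hnil]
        have hnp : ¬ isPow2 (l.length + 1) := fun h => hc ⟨hn, h⟩
        simp only [List.length_append, List.length_cons, List.length_nil]
        rw [lg_succ_not_pow hn hnp]

-- modify at the last index is snocLast
theorem modify_last (ls : List (List Int)) (x : Int) (h : ls ≠ []) :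
    ls.modify (ls.length - 1) (fun b => b ++ [x]) = snocLast ls x := by
  induction ls with
  | nil => exact absurd rfl h
  | cons b bs ih =>
    cases bs with
    | nil => rfl
    | cons c cs =>
      rw [snocLast_cons _ _ _ (by simp)]
      have hlen : (b :: c :: cs).length - 1 = ((c :: cs).length - 1) + 1 := by simp
      rw [hlen, List.modify_succ_cons, ih (by simp)]

-- modify at the index just past ls appends inside the freshly added bucket
theorem modify_append_last (ls : List (List Int)) (b : List Int) (x : Int) :
    (ls ++ [b]).modify ls.length (fun c => c ++ [x]) = ls ++ [b ++ [x]] := by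
  induction ls with
  | nil => rfl
  | cons a as ih => simpa using ih

-- the level of global index n is lg (n+1)
theorem level_eq (n : Nat) : PySem.Int.bitLength ((n : Int) + 1) - 1 = lg (n + 1) := by
  unfold lg
  congr 2

-- B equals gref
theorem alt_eq_gref (l : List Int) : bin_levels_alt l = gref 1 l := by
  induction l using List.reverseRecOn with
  | nil =>
    unfold bin_levels_alt gref
    rw [dif_neg (by simp)]
    rfl
  | append_singleton l x ih =>
    have hfold : bin_levels_alt (l ++ [x]) =
        (fun lvls (p : Int × Int) =>
          let level := PySem.Int.bitLength (p.1 + 1) - 1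
          let lvls' := if level = lvls.length then lvls ++ [([] : List Int)] else lvls
          lvls'.modify level (fun b => b ++ [p.2])) (bin_levels_alt l) ((l.length : Int), x) := by
      unfold bin_levels_alt
      rw [PySem.List.enumerate_append, List.foldl_append]
      norm_num [PySem.List.enumerate]
    rw [hfold, ih]
    simp only [level_eq]
    have hs := gref_snoc l.length 0 l x (le_refl _)
    rw [pow_zero] at hs
    by_cases hnil : l = []
    · subst hnil
      rw [hs.2 (by simp)]
      unfold gref
      rw [dif_neg (by simp)]
      simp [lg_one, snocLast]
    · have hn : 0 < l.length := List.length_pos_iff.mpr hnil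
      have hlen := length_gref l hnil
      by_cases hp : isPow2 (l.length + 1)
      · -- new bucket: level = lg n + 1 = current length, so a fresh [] is appended and filled
        have hlev : lg (l.length + 1) = lg l.length + 1 := lg_succ_pow hn hp
        rw [hs.1 ⟨hn, hp⟩]
        simp only [hlev, ← hlen]
        simpa using modify_append_last (gref 1 l) [] x
      · -- same bucket: level = lg n = last index, no new bucket
        have hlev : lg (l.length + 1) = lg l.length := lg_succ_not_pow hn hp
        rw [hs.2 (fun h => hp h.2)]
        simp only [hlev]
        rw [hlen, if_neg (by omega)]
        have hidx : lg l.length = (gref 1 l).length - 1 := by omega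
        rw [hidx, modify_last _ _ (gref_ne_nil _ _)]

-- A's slice lst[m-1:2*m-1] is the take/drop block of the current level
theorem slice_block (lst : List Int) (m : Nat) (hm : 0 < m) :
    PySem.List.slice lst (some ((m : Int) - 1)) (some (2 * (m : Int) - 1))
      = (lst.drop (m - 1)).take m := by
  have e1 : (m : Int) - 1 = ((m - 1 : Nat) : Int) := by omega
  have e2 : 2 * (m : Int) - 1 = ((2 * m - 1 : Nat) : Int) := by omega
  rw [e1, e2, PySem.List.slice_natCast]
  congr 1
  omega

-- A's final slice lst[m-1:n+1] is the remaining tail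
theorem slice_tail (lst : List Int) (m : Nat) (hm : 0 < m) :
    PySem.List.slice lst (some ((m : Int) - 1)) (some ((lst.length : Int) + 1))
      = lst.drop (m - 1) := by
  have e1 : (m : Int) - 1 = ((m - 1 : Nat) : Int) := by omega
  have e2 : (lst.length : Int) + 1 = ((lst.length + 1 : Nat) : Int) := by omega
  rw [e1, e2, PySem.List.slice_natCast]
  apply List.take_of_length_le
  simp
  omega

-- A equals gref
theorem loopA_eq_gref (lst : List Int) : ∀ (m : Nat) (hm : 0 < m) (lvls : List (List Int)),
    binLoopA lst m hm lvls = lvls ++ gref m (lst.drop (m - 1)) := by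
  intro m hm lvls
  induction m, hm, lvls using binLoopA.induct lst with
  | case1 m hm lvls h ih =>
    rw [binLoopA, dif_pos h, ih]
    conv_rhs => rw [gref]
    rw [dif_pos (by simp; omega)]
    rw [slice_block lst m hm, List.drop_drop]
    have e3 : m - 1 + m = 2 * m - 1 := by omega
    rw [e3]
    simp
  | case2 m hm lvls h =>
    rw [binLoopA, dif_neg h]
    conv_rhs => rw [gref]
    rw [dif_neg (by simp; omega)]
    rw [slice_tail lst m hm]

-- ===== VERDICT (by name: the statement is the Claim_ definition above) =====
theorem bin_levels_spec : Claim_equal_bin_levels := by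
  intro lst _
  show bin_levels lst = bin_levels_alt lst
  rw [bin_levels, loopA_eq_gref, alt_eq_gref]
  simp
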